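-- pv_equiv track=rewrite | github.com/Gautham-17/lab2 | q1.py | get_best_neighbor
-- ===== SOURCE A (Python) =====
-- def compute_conflicts(state):
--     # Count number of pairs of queens attacking each other
--     conflicts = 0
--     for i in range(8):
--         for j in range(i + 1, 8):
--             if state[i] == state[j] or abs(state[i] - state[j]) == j - i:
--                 conflicts += 1
--     return conflicts
--
-- def get_best_neighbor(state):
--     best = state[:]
--     min_conflicts = compute_conflicts(state)
--
--     for row in range(8):
--         original_col = state[row]
--         for col in range(8):
--             if col == original_col:
--                 continue
--             new_state = state[:]
--             new_state[row] = col
--             score = compute_conflicts(new_state)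
--             if score < min_conflicts:
--                 min_conflicts = score
--                 best = new_state[:]
--
--     return best, min_conflicts
-- ===== SOURCE B (Python) =====
-- def row_conflicts(state, row, col):
--     # conflicts a queen placed at (row, col) would have with the queens in the other rows
--     n = 0
--     for i in range(row):
--         if state[i] == col or abs(state[i] - col) == row - i:
--             n += 1
--     for j in range(row + 1, 8):
--         if col == state[j] or abs(col - state[j]) == j - row:
--             n += 1
--     return n
--
-- def get_best_neighbor(state):
--     # Score each neighbor incrementally: base conflicts minus the moved queen's old
--     # conflicts plus its conflicts at the new column (O(8) per neighbor, not O(28)).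
--     # base conflict count: pair each queen with the queens in the earlier rows
--     base = 0
--     for row in range(8):
--         for i in range(row):
--             if state[i] == state[row] or abs(state[i] - state[row]) == row - i:
--                 base += 1
--     best = state[:]
--     min_conflicts = base
--     for row in range(8):
--         original_col = state[row]
--         removed = row_conflicts(state, row, original_col)
--         for col in range(8):
--             if col == original_col:
--                 continue
--             score = base - removed + row_conflicts(state, row, col)
--             if score < min_conflicts:
--                 min_conflicts = score
--                 best = state[:]
--                 best[row] = col
--     return best, min_conflicts
-- ===== Notes on version B (the rewrite author's own statement) =====
-- stated objective: faster
-- what changed: B computes the full 28-pair conflict count once, then scores every neighbor incrementally as base minus the moved queen's conflicts at its original column plus its conflicts at the new column (7 pair tests per neighbor instead of rebuilding the board and rescanning all 28 pairs).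
import Mathlib
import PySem

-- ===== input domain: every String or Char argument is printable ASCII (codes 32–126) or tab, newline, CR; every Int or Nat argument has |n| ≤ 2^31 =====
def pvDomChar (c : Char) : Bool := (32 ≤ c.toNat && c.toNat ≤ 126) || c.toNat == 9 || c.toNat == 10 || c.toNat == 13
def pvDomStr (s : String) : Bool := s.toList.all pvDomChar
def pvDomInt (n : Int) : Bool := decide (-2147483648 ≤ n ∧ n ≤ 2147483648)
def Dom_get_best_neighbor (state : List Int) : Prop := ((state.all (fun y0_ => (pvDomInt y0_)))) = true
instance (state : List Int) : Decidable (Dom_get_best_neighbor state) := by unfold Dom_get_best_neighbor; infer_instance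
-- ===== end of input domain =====

-- B scores each neighbor incrementally (base conflicts − moved queen's old conflicts + its new
-- conflicts) instead of rebuilding the board and rescanning all 28 pairs per neighbor.

-- ===== PORT A =====
-- module helper compute_conflicts (used by A)
def compute_conflicts (state : List Int) : Int :=
  (PySem.List.pyRange 0 8 1).foldl (fun conflicts i =>
    (PySem.List.pyRange (i + 1) 8 1).foldl (fun conflicts j =>
      if PySem.List.pyGetD state i 0 = PySem.List.pyGetD state j 0 ∨
         |PySem.List.pyGetD state i 0 - PySem.List.pyGetD state j 0| = j - i
      then conflicts + 1 else conflicts) conflicts) 0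

-- state[i] / new_state[row] = col are in range whenever Pre_ holds, so pyGetD/pySetD are exact here
def get_best_neighbor (state : List Int) : List Int × Int :=
  let best := state
  let min_conflicts := compute_conflicts state
  (PySem.List.pyRange 0 8 1).foldl (fun acc row =>
    let original_col := PySem.List.pyGetD state row 0
    (PySem.List.pyRange 0 8 1).foldl (fun acc col =>
      if col = original_col then acc
      else
        let new_state := PySem.List.pySetD state row col
        let score := compute_conflicts new_state
        if score < acc.2 then (new_state, score) else acc) acc) (best, min_conflicts)

-- ===== PORT B =====
-- conflicts a queen placed at (row, col) would have with the queens in the other rows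
def row_conflicts (state : List Int) (row col : Int) : Int :=
  let n := (PySem.List.pyRange 0 row 1).foldl (fun n i =>
    if PySem.List.pyGetD state i 0 = col ∨ |PySem.List.pyGetD state i 0 - col| = row - i
    then n + 1 else n) 0
  (PySem.List.pyRange (row + 1) 8 1).foldl (fun n j =>
    if col = PySem.List.pyGetD state j 0 ∨ |col - PySem.List.pyGetD state j 0| = j - row
    then n + 1 else n) n

def get_best_neighbor_alt (state : List Int) : List Int × Int :=
  let base := (PySem.List.pyRange 0 8 1).foldl (fun base row =>
    (PySem.List.pyRange 0 row 1).foldl (fun base i =>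
      if PySem.List.pyGetD state i 0 = PySem.List.pyGetD state row 0 ∨
         |PySem.List.pyGetD state i 0 - PySem.List.pyGetD state row 0| = row - i
      then base + 1 else base) base) 0
  (PySem.List.pyRange 0 8 1).foldl (fun acc row =>
    let original_col := PySem.List.pyGetD state row 0
    let removed := row_conflicts state row original_col
    (PySem.List.pyRange 0 8 1).foldl (fun acc col =>
      if col = original_col then acc
      else
        let score := base - removed + row_conflicts state row col
        if score < acc.2 then (PySem.List.pySetD state row col, score) else acc) acc) (state, base)

-- ===== PRECONDITION & SPEC =====
-- Python A indexes state[0..7] and raises IndexError on lists shorter than 8; exactly those are excluded.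
def Pre_get_best_neighbor (state : List Int) : Prop := 8 ≤ state.length
instance (state : List Int) : Decidable (Pre_get_best_neighbor state) := by unfold Pre_get_best_neighbor; infer_instance
def pvWitness_get_best_neighbor : List Int := [0, 1, 2, 3, 4, 5, 6, 7]
def Spec_get_best_neighbor (state : List Int) (out : List Int × Int) : Prop := out = get_best_neighbor_alt state
instance (state : List Int) (out : List Int × Int) : Decidable (Spec_get_best_neighbor state out) := by unfold Spec_get_best_neighbor; infer_instance

-- ===== CLAIM (what is proved, stated in full; the proofs are below) =====
def Claim_equal_get_best_neighbor : Prop := ∀ (state : List Int), Dom_get_best_neighbor state → Pre_get_best_neighbor state → Spec_get_best_neighbor state (get_best_neighbor state)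

-- ===== LEMMAS AND PROOFS =====

lemma pv_rng8 : PySem.List.pyRange 0 8 1 = [0,1,2,3,4,5,6,7] := by decide
lemma pv_rng_hi1 : PySem.List.pyRange 1 8 1 = [1,2,3,4,5,6,7] := by decide
lemma pv_rng_hi2 : PySem.List.pyRange 2 8 1 = [2,3,4,5,6,7] := by decide
lemma pv_rng_hi3 : PySem.List.pyRange 3 8 1 = [3,4,5,6,7] := by decide
lemma pv_rng_hi4 : PySem.List.pyRange 4 8 1 = [4,5,6,7] := by decide
lemma pv_rng_hi5 : PySem.List.pyRange 5 8 1 = [5,6,7] := by decide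
lemma pv_rng_hi6 : PySem.List.pyRange 6 8 1 = [6,7] := by decide
lemma pv_rng_hi7 : PySem.List.pyRange 7 8 1 = [7] := by decide
lemma pv_rng_lo1 : PySem.List.pyRange 0 1 1 = [0] := by decide
lemma pv_rng_lo2 : PySem.List.pyRange 0 2 1 = [0,1] := by decide
lemma pv_rng_lo3 : PySem.List.pyRange 0 3 1 = [0,1,2] := by decide
lemma pv_rng_lo4 : PySem.List.pyRange 0 4 1 = [0,1,2,3] := by decide
lemma pv_rng_lo5 : PySem.List.pyRange 0 5 1 = [0,1,2,3,4] := by decide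
lemma pv_rng_lo6 : PySem.List.pyRange 0 6 1 = [0,1,2,3,4,5] := by decide
lemma pv_rng_lo7 : PySem.List.pyRange 0 7 1 = [0,1,2,3,4,5,6] := by decide

lemma pv_get8 (x0 x1 x2 x3 x4 x5 x6 x7 : Int) (t : List Int) :
    PySem.List.pyGetD (x0::x1::x2::x3::x4::x5::x6::x7::t) 0 0 = x0 ∧
    PySem.List.pyGetD (x0::x1::x2::x3::x4::x5::x6::x7::t) 1 0 = x1 ∧
    PySem.List.pyGetD (x0::x1::x2::x3::x4::x5::x6::x7::t) 2 0 = x2 ∧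
    PySem.List.pyGetD (x0::x1::x2::x3::x4::x5::x6::x7::t) 3 0 = x3 ∧
    PySem.List.pyGetD (x0::x1::x2::x3::x4::x5::x6::x7::t) 4 0 = x4 ∧
    PySem.List.pyGetD (x0::x1::x2::x3::x4::x5::x6::x7::t) 5 0 = x5 ∧
    PySem.List.pyGetD (x0::x1::x2::x3::x4::x5::x6::x7::t) 6 0 = x6 ∧
    PySem.List.pyGetD (x0::x1::x2::x3::x4::x5::x6::x7::t) 7 0 = x7 := by
  refine ⟨?_, ?_, ?_, ?_, ?_, ?_, ?_, ?_⟩ <;> simp [pysem]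

lemma pv_delta0 (a0 a1 a2 a3 a4 a5 a6 a7 : Int) (t : List Int) (c : Int) :
    compute_conflicts (PySem.List.pySetD (a0::a1::a2::a3::a4::a5::a6::a7::t) 0 c)
      = compute_conflicts (a0::a1::a2::a3::a4::a5::a6::a7::t)
        - row_conflicts (a0::a1::a2::a3::a4::a5::a6::a7::t) 0 a0
        + row_conflicts (a0::a1::a2::a3::a4::a5::a6::a7::t) 0 c := by
  have hset : PySem.List.pySetD (a0::a1::a2::a3::a4::a5::a6::a7::t) 0 c = (c::a1::a2::a3::a4::a5::a6::a7::t) := by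
    simp [PySem.List.pySetD_of_nonneg _ _ (by norm_num : (0:Int) ≤ 0)]
  obtain ⟨g0, g1, g2, g3, g4, g5, g6, g7⟩ := pv_get8 a0 a1 a2 a3 a4 a5 a6 a7 t
  obtain ⟨s0, s1, s2, s3, s4, s5, s6, s7⟩ := pv_get8 c a1 a2 a3 a4 a5 a6 a7 t
  have hstep : ∀ (p : Prop) [Decidable p] (n : Int), (if p then n + 1 else n) = n + (if p then 1 else 0) := by
    intro p _ n; split <;> ring
  rw [hset]
  simp [compute_conflicts, row_conflicts, pv_rng8, pv_rng_hi1, pv_rng_hi2, pv_rng_hi3,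
    pv_rng_hi4, pv_rng_hi5, pv_rng_hi6, pv_rng_hi7,
    g0, g1, g2, g3, g4, g5, g6, g7, s0, s1, s2, s3, s4, s5, s6, s7, hstep]
  ring

lemma pv_delta1 (a0 a1 a2 a3 a4 a5 a6 a7 : Int) (t : List Int) (c : Int) :
    compute_conflicts (PySem.List.pySetD (a0::a1::a2::a3::a4::a5::a6::a7::t) 1 c)
      = compute_conflicts (a0::a1::a2::a3::a4::a5::a6::a7::t)
        - row_conflicts (a0::a1::a2::a3::a4::a5::a6::a7::t) 1 a1
        + row_conflicts (a0::a1::a2::a3::a4::a5::a6::a7::t) 1 c := by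
  have hset : PySem.List.pySetD (a0::a1::a2::a3::a4::a5::a6::a7::t) 1 c = (a0::c::a2::a3::a4::a5::a6::a7::t) := by
    simp [PySem.List.pySetD_of_nonneg _ _ (by norm_num : (0:Int) ≤ 1), List.set]
  obtain ⟨g0, g1, g2, g3, g4, g5, g6, g7⟩ := pv_get8 a0 a1 a2 a3 a4 a5 a6 a7 t
  obtain ⟨s0, s1, s2, s3, s4, s5, s6, s7⟩ := pv_get8 a0 c a2 a3 a4 a5 a6 a7 t
  have hstep : ∀ (p : Prop) [Decidable p] (n : Int), (if p then n + 1 else n) = n + (if p then 1 else 0) := by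
    intro p _ n; split <;> ring
  rw [hset]
  simp [compute_conflicts, row_conflicts, pv_rng8, pv_rng_hi1, pv_rng_hi2, pv_rng_hi3,
    pv_rng_hi4, pv_rng_hi5, pv_rng_hi6, pv_rng_hi7, pv_rng_lo1,
    g0, g1, g2, g3, g4, g5, g6, g7, s0, s1, s2, s3, s4, s5, s6, s7, hstep]
  ring

lemma pv_delta2 (a0 a1 a2 a3 a4 a5 a6 a7 : Int) (t : List Int) (c : Int) :
    compute_conflicts (PySem.List.pySetD (a0::a1::a2::a3::a4::a5::a6::a7::t) 2 c)
      = compute_conflicts (a0::a1::a2::a3::a4::a5::a6::a7::t)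
        - row_conflicts (a0::a1::a2::a3::a4::a5::a6::a7::t) 2 a2
        + row_conflicts (a0::a1::a2::a3::a4::a5::a6::a7::t) 2 c := by
  have hset : PySem.List.pySetD (a0::a1::a2::a3::a4::a5::a6::a7::t) 2 c = (a0::a1::c::a3::a4::a5::a6::a7::t) := by
    simp [PySem.List.pySetD_of_nonneg _ _ (by norm_num : (0:Int) ≤ 2), List.set]
  obtain ⟨g0, g1, g2, g3, g4, g5, g6, g7⟩ := pv_get8 a0 a1 a2 a3 a4 a5 a6 a7 t
  obtain ⟨s0, s1, s2, s3, s4, s5, s6, s7⟩ := pv_get8 a0 a1 c a3 a4 a5 a6 a7 t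
  have hstep : ∀ (p : Prop) [Decidable p] (n : Int), (if p then n + 1 else n) = n + (if p then 1 else 0) := by
    intro p _ n; split <;> ring
  rw [hset]
  simp [compute_conflicts, row_conflicts, pv_rng8, pv_rng_hi1, pv_rng_hi2, pv_rng_hi3,
    pv_rng_hi4, pv_rng_hi5, pv_rng_hi6, pv_rng_hi7, pv_rng_lo2,
    g0, g1, g2, g3, g4, g5, g6, g7, s0, s1, s2, s3, s4, s5, s6, s7, hstep]
  ring

lemma pv_delta3 (a0 a1 a2 a3 a4 a5 a6 a7 : Int) (t : List Int) (c : Int) :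
    compute_conflicts (PySem.List.pySetD (a0::a1::a2::a3::a4::a5::a6::a7::t) 3 c)
      = compute_conflicts (a0::a1::a2::a3::a4::a5::a6::a7::t)
        - row_conflicts (a0::a1::a2::a3::a4::a5::a6::a7::t) 3 a3
        + row_conflicts (a0::a1::a2::a3::a4::a5::a6::a7::t) 3 c := by
  have hset : PySem.List.pySetD (a0::a1::a2::a3::a4::a5::a6::a7::t) 3 c = (a0::a1::a2::c::a4::a5::a6::a7::t) := by
    simp [PySem.List.pySetD_of_nonneg _ _ (by norm_num : (0:Int) ≤ 3), List.set]
  obtain ⟨g0, g1, g2, g3, g4, g5, g6, g7⟩ := pv_get8 a0 a1 a2 a3 a4 a5 a6 a7 t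
  obtain ⟨s0, s1, s2, s3, s4, s5, s6, s7⟩ := pv_get8 a0 a1 a2 c a4 a5 a6 a7 t
  have hstep : ∀ (p : Prop) [Decidable p] (n : Int), (if p then n + 1 else n) = n + (if p then 1 else 0) := by
    intro p _ n; split <;> ring
  rw [hset]
  simp [compute_conflicts, row_conflicts, pv_rng8, pv_rng_hi1, pv_rng_hi2, pv_rng_hi3,
    pv_rng_hi4, pv_rng_hi5, pv_rng_hi6, pv_rng_hi7, pv_rng_lo3,
    g0, g1, g2, g3, g4, g5, g6, g7, s0, s1, s2, s3, s4, s5, s6, s7, hstep]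
  ring

lemma pv_delta4 (a0 a1 a2 a3 a4 a5 a6 a7 : Int) (t : List Int) (c : Int) :
    compute_conflicts (PySem.List.pySetD (a0::a1::a2::a3::a4::a5::a6::a7::t) 4 c)
      = compute_conflicts (a0::a1::a2::a3::a4::a5::a6::a7::t)
        - row_conflicts (a0::a1::a2::a3::a4::a5::a6::a7::t) 4 a4
        + row_conflicts (a0::a1::a2::a3::a4::a5::a6::a7::t) 4 c := by
  have hset : PySem.List.pySetD (a0::a1::a2::a3::a4::a5::a6::a7::t) 4 c = (a0::a1::a2::a3::c::a5::a6::a7::t) := by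
    simp [PySem.List.pySetD_of_nonneg _ _ (by norm_num : (0:Int) ≤ 4), List.set]
  obtain ⟨g0, g1, g2, g3, g4, g5, g6, g7⟩ := pv_get8 a0 a1 a2 a3 a4 a5 a6 a7 t
  obtain ⟨s0, s1, s2, s3, s4, s5, s6, s7⟩ := pv_get8 a0 a1 a2 a3 c a5 a6 a7 t
  have hstep : ∀ (p : Prop) [Decidable p] (n : Int), (if p then n + 1 else n) = n + (if p then 1 else 0) := by
    intro p _ n; split <;> ring
  rw [hset]
  simp [compute_conflicts, row_conflicts, pv_rng8, pv_rng_hi1, pv_rng_hi2, pv_rng_hi3,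
    pv_rng_hi4, pv_rng_hi5, pv_rng_hi6, pv_rng_hi7, pv_rng_lo4,
    g0, g1, g2, g3, g4, g5, g6, g7, s0, s1, s2, s3, s4, s5, s6, s7, hstep]
  ring

lemma pv_delta5 (a0 a1 a2 a3 a4 a5 a6 a7 : Int) (t : List Int) (c : Int) :
    compute_conflicts (PySem.List.pySetD (a0::a1::a2::a3::a4::a5::a6::a7::t) 5 c)
      = compute_conflicts (a0::a1::a2::a3::a4::a5::a6::a7::t)
        - row_conflicts (a0::a1::a2::a3::a4::a5::a6::a7::t) 5 a5
        + row_conflicts (a0::a1::a2::a3::a4::a5::a6::a7::t) 5 c := by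
  have hset : PySem.List.pySetD (a0::a1::a2::a3::a4::a5::a6::a7::t) 5 c = (a0::a1::a2::a3::a4::c::a6::a7::t) := by
    simp [PySem.List.pySetD_of_nonneg _ _ (by norm_num : (0:Int) ≤ 5), List.set]
  obtain ⟨g0, g1, g2, g3, g4, g5, g6, g7⟩ := pv_get8 a0 a1 a2 a3 a4 a5 a6 a7 t
  obtain ⟨s0, s1, s2, s3, s4, s5, s6, s7⟩ := pv_get8 a0 a1 a2 a3 a4 c a6 a7 t
  have hstep : ∀ (p : Prop) [Decidable p] (n : Int), (if p then n + 1 else n) = n + (if p then 1 else 0) := by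
    intro p _ n; split <;> ring
  rw [hset]
  simp [compute_conflicts, row_conflicts, pv_rng8, pv_rng_hi1, pv_rng_hi2, pv_rng_hi3,
    pv_rng_hi4, pv_rng_hi5, pv_rng_hi6, pv_rng_hi7, pv_rng_lo5,
    g0, g1, g2, g3, g4, g5, g6, g7, s0, s1, s2, s3, s4, s5, s6, s7, hstep]
  ring

lemma pv_delta6 (a0 a1 a2 a3 a4 a5 a6 a7 : Int) (t : List Int) (c : Int) :
    compute_conflicts (PySem.List.pySetD (a0::a1::a2::a3::a4::a5::a6::a7::t) 6 c)
      = compute_conflicts (a0::a1::a2::a3::a4::a5::a6::a7::t)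
        - row_conflicts (a0::a1::a2::a3::a4::a5::a6::a7::t) 6 a6
        + row_conflicts (a0::a1::a2::a3::a4::a5::a6::a7::t) 6 c := by
  have hset : PySem.List.pySetD (a0::a1::a2::a3::a4::a5::a6::a7::t) 6 c = (a0::a1::a2::a3::a4::a5::c::a7::t) := by
    simp [PySem.List.pySetD_of_nonneg _ _ (by norm_num : (0:Int) ≤ 6), List.set]
  obtain ⟨g0, g1, g2, g3, g4, g5, g6, g7⟩ := pv_get8 a0 a1 a2 a3 a4 a5 a6 a7 t
  obtain ⟨s0, s1, s2, s3, s4, s5, s6, s7⟩ := pv_get8 a0 a1 a2 a3 a4 a5 c a7 t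
  have hstep : ∀ (p : Prop) [Decidable p] (n : Int), (if p then n + 1 else n) = n + (if p then 1 else 0) := by
    intro p _ n; split <;> ring
  rw [hset]
  simp [compute_conflicts, row_conflicts, pv_rng8, pv_rng_hi1, pv_rng_hi2, pv_rng_hi3,
    pv_rng_hi4, pv_rng_hi5, pv_rng_hi6, pv_rng_hi7, pv_rng_lo6,
    g0, g1, g2, g3, g4, g5, g6, g7, s0, s1, s2, s3, s4, s5, s6, s7, hstep]
  ring

lemma pv_delta7 (a0 a1 a2 a3 a4 a5 a6 a7 : Int) (t : List Int) (c : Int) :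
    compute_conflicts (PySem.List.pySetD (a0::a1::a2::a3::a4::a5::a6::a7::t) 7 c)
      = compute_conflicts (a0::a1::a2::a3::a4::a5::a6::a7::t)
        - row_conflicts (a0::a1::a2::a3::a4::a5::a6::a7::t) 7 a7
        + row_conflicts (a0::a1::a2::a3::a4::a5::a6::a7::t) 7 c := by
  have hset : PySem.List.pySetD (a0::a1::a2::a3::a4::a5::a6::a7::t) 7 c = (a0::a1::a2::a3::a4::a5::a6::c::t) := by
    simp [PySem.List.pySetD_of_nonneg _ _ (by norm_num : (0:Int) ≤ 7), List.set]
  obtain ⟨g0, g1, g2, g3, g4, g5, g6, g7⟩ := pv_get8 a0 a1 a2 a3 a4 a5 a6 a7 t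
  obtain ⟨s0, s1, s2, s3, s4, s5, s6, s7⟩ := pv_get8 a0 a1 a2 a3 a4 a5 a6 c t
  have hstep : ∀ (p : Prop) [Decidable p] (n : Int), (if p then n + 1 else n) = n + (if p then 1 else 0) := by
    intro p _ n; split <;> ring
  rw [hset]
  simp [compute_conflicts, row_conflicts, pv_rng8, pv_rng_hi1, pv_rng_hi2, pv_rng_hi3,
    pv_rng_hi4, pv_rng_hi5, pv_rng_hi6, pv_rng_hi7, pv_rng_lo7,
    g0, g1, g2, g3, g4, g5, g6, g7, s0, s1, s2, s3, s4, s5, s6, s7, hstep]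
  ring

lemma pv_base (a0 a1 a2 a3 a4 a5 a6 a7 : Int) (t : List Int) :
    ((PySem.List.pyRange 0 8 1).foldl (fun base row =>
      (PySem.List.pyRange 0 row 1).foldl (fun base i =>
        if PySem.List.pyGetD (a0::a1::a2::a3::a4::a5::a6::a7::t) i 0 = PySem.List.pyGetD (a0::a1::a2::a3::a4::a5::a6::a7::t) row 0 ∨
           |PySem.List.pyGetD (a0::a1::a2::a3::a4::a5::a6::a7::t) i 0 - PySem.List.pyGetD (a0::a1::a2::a3::a4::a5::a6::a7::t) row 0| = row - i
        then base + 1 else base) base) 0)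
      = compute_conflicts (a0::a1::a2::a3::a4::a5::a6::a7::t) := by
  obtain ⟨g0, g1, g2, g3, g4, g5, g6, g7⟩ := pv_get8 a0 a1 a2 a3 a4 a5 a6 a7 t
  have hstep : ∀ (p : Prop) [Decidable p] (n : Int), (if p then n + 1 else n) = n + (if p then 1 else 0) := by
    intro p _ n; split <;> ring
  simp [compute_conflicts, pv_rng8, pv_rng_hi1, pv_rng_hi2, pv_rng_hi3, pv_rng_hi4,
    pv_rng_hi5, pv_rng_hi6, pv_rng_hi7, pv_rng_lo1, pv_rng_lo2, pv_rng_lo3,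
    pv_rng_lo4, pv_rng_lo5, pv_rng_lo6, pv_rng_lo7, g0, g1, g2, g3, g4, g5, g6, g7, hstep]
  ring


-- ===== VERDICT (by name: the statement is the Claim_ definition above) =====
theorem get_best_neighbor_spec : Claim_equal_get_best_neighbor := by
  intro state _hDom hPre
  unfold Spec_get_best_neighbor
  unfold Pre_get_best_neighbor at hPre
  rcases state with _ | ⟨a0, _ | ⟨a1, _ | ⟨a2, _ | ⟨a3, _ | ⟨a4, _ | ⟨a5, _ | ⟨a6, _ | ⟨a7, t⟩⟩⟩⟩⟩⟩⟩⟩ <;>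
    simp only [List.length_nil, List.length_cons] at hPre
  all_goals try omega
  obtain ⟨g0, g1, g2, g3, g4, g5, g6, g7⟩ := pv_get8 a0 a1 a2 a3 a4 a5 a6 a7 t
  simp only [get_best_neighbor, get_best_neighbor_alt, pv_base]
  apply PySem.List.foldl_congr_mem
  intro acc row hrow
  rw [pv_rng8] at hrow
  simp only [List.mem_cons, List.not_mem_nil, or_false] at hrow
  rcases hrow with rfl | rfl | rfl | rfl | rfl | rfl | rfl | rfl <;>
    (apply PySem.List.foldl_congr_mem; intro acc2 col _) <;>
    simp only [g0, g1, g2, g3, g4, g5, g6, g7,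
      pv_delta0, pv_delta1, pv_delta2, pv_delta3, pv_delta4, pv_delta5, pv_delta6, pv_delta7]
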